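-- pv_equiv track=rewrite | github.com/Lingviston/aoboi3 | cache_analyzer/cache_hit_analyzer.py | get_best_cache_block_index
-- ===== SOURCE A (Python) =====
-- def get_best_cache_block_index(cache, cache_line_number, cache_line_number_block):
--   best = None
--   best_index = 0
--   index = 0
--   for block in cache:
--     cache_line = block[cache_line_number_block]
--     line_number = cache_line[0]
--     use_count = cache_line[1]
--
--     if line_number == cache_line_number: # cache hit
--       best = cache_line
--       best_index = index
--       break
--     elif line_number == None and use_count == None: # found empty cache line
--       best = cache_line
--       best_index = index
--     elif best == None: # found cache_line and we haven't selected any other yet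
--       best = cache_line
--       best_index = index
--     elif best[1] != None and use_count < best[1]: # found cache line which is older than the one that we selected
--       best = cache_line
--       best_index = index
--
--     index += 1
--
--   return best_index
-- ===== SOURCE B (Python) =====
-- def get_best_cache_block_index(cache, cache_line_number, cache_line_number_block):
--   # phase 1: a cache hit wins -> first matching index
--   for i, block in enumerate(cache):
--     if block[cache_line_number_block][0] == cache_line_number:
--       return i
--   # phase 2: otherwise prefer an empty line -> last empty index
--   last_empty = None
--   for i, block in enumerate(cache):
--     line = block[cache_line_number_block]
--     if line[0] is None and line[1] is None:
--       last_empty = i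
--   if last_empty is not None:
--     return last_empty
--   # phase 3: evict the least recently used -> first index of the minimal use
--   # count (a selected None use count is never displaced)
--   counts = [block[cache_line_number_block][1] for block in cache]
--   best_i = 0
--   for i in range(1, len(counts)):
--     if counts[best_i] is not None and counts[i] < counts[best_i]:
--       best_i = i
--   return best_i
-- ===== Notes on version B (the rewrite author's own statement) =====
-- stated objective: alternative
-- what changed: Replaced A's single combined scan with stateful best/best_index tracking by three independent priority passes (first hit index, else last empty index, else a first-minimum scan over the extracted use-count list), making the hit > empty > LRU precedence explicit.
import Mathlib
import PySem

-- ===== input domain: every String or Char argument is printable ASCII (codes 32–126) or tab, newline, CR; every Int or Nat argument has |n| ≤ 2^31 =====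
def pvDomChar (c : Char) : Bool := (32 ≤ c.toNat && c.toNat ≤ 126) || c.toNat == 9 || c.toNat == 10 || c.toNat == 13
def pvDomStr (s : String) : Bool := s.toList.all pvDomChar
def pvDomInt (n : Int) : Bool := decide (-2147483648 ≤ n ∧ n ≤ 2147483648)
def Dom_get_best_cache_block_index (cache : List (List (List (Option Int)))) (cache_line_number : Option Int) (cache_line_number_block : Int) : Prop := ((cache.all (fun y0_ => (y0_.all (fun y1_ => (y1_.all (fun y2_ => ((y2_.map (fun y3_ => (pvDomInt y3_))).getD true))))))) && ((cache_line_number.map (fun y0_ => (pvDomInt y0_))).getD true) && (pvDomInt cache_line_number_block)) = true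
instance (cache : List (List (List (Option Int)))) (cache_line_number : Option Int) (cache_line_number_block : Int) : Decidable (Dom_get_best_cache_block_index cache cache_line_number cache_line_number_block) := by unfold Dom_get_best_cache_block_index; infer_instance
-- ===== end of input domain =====

-- B replaces A's single stateful scan by three explicit priority passes (first hit, last empty,
-- first minimal use count); objective: alternative decomposition. Return-value equivalence only
-- (neither program mutates its arguments).

-- ===== PORT A =====
-- pvAgo: A's single for-loop; `none` marks the points where the Python raises
-- (IndexError on block[clnb]/cache_line[0]/cache_line[1], TypeError on `None < int`).
def pvAgo (cln : Option Int) (clnb : Int) : List (List (List (Option Int))) → Option (List (Option Int)) → Int → Int → Option Int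
  | [], _, best_index, _ => some best_index
  | block :: rest, best, best_index, index =>
    match PySem.List.pyGet? block clnb with
    | none => none
    | some cache_line =>
      match PySem.List.pyGet? cache_line 0 with
      | none => none
      | some line_number =>
        match PySem.List.pyGet? cache_line 1 with
        | none => none
        | some use_count =>
          if line_number = cln then some index
          else if line_number = none ∧ use_count = none then
            pvAgo cln clnb rest (some cache_line) index (index + 1)
          else
            match best with
            | none => pvAgo cln clnb rest (some cache_line) index (index + 1)
            | some b =>
              match PySem.List.pyGet? b 1 with
              | none => none
              | some b1 =>
                match b1 with
                | none => pvAgo cln clnb rest best best_index (index + 1)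
                | some bv =>
                  match use_count with
                  | none => none
                  | some u =>
                    if u < bv then pvAgo cln clnb rest (some cache_line) index (index + 1)
                    else pvAgo cln clnb rest best best_index (index + 1)

def get_best_cache_block_index (cache : List (List (List (Option Int)))) (cache_line_number : Option Int) (cache_line_number_block : Int) : Int :=
  (pvAgo cache_line_number cache_line_number_block cache none 0 0).getD 0

-- ===== PORT B =====
-- phase 1: first index whose line number equals cache_line_number
def pvBhit (cln : Option Int) (clnb : Int) : List (List (List (Option Int))) → Int → Option (Option Int)
  | [], _ => some none
  | block :: rest, i =>
    match PySem.List.pyGet? block clnb with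
    | none => none
    | some cl =>
      match PySem.List.pyGet? cl 0 with
      | none => none
      | some l => if l = cln then some (some i) else pvBhit cln clnb rest (i + 1)

-- phase 2: last index whose line is (None, None); `and` short-circuits as in Python
def pvBempty (clnb : Int) : List (List (List (Option Int))) → Int → Option Int → Option (Option Int)
  | [], _, acc => some acc
  | block :: rest, i, acc =>
    match PySem.List.pyGet? block clnb with
    | none => none
    | some line =>
      match PySem.List.pyGet? line 0 with
      | none => none
      | some l =>
        if l = none then
          match PySem.List.pyGet? line 1 with
          | none => none
          | some u =>
            if u = none then pvBempty clnb rest (i + 1) (some i)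
            else pvBempty clnb rest (i + 1) acc
        else pvBempty clnb rest (i + 1) acc

-- phase 3 comprehension: [block[clnb][1] for block in cache]
def pvBcounts (clnb : Int) : List (List (List (Option Int))) → Option (List (Option Int))
  | [] => some []
  | block :: rest =>
    match PySem.List.pyGet? block clnb with
    | none => none
    | some cl =>
      match PySem.List.pyGet? cl 1 with
      | none => none
      | some u => (pvBcounts clnb rest).map (u :: ·)

-- phase 3 loop: first index of the minimal count; state = (counts[best_i], best_i, i);
-- the `is not None` guard short-circuits, `None < int` is a TypeError = none
def pvBlru : Option Int → Int → Int → List (Option Int) → Option Int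
  | _, bi, _, [] => some bi
  | bval, bi, i, c :: rest =>
    match bval with
    | none => pvBlru bval bi (i + 1) rest
    | some bv =>
      match c with
      | none => none
      | some cv =>
        if cv < bv then pvBlru c i (i + 1) rest
        else pvBlru bval bi (i + 1) rest

def get_best_cache_block_index_alt (cache : List (List (List (Option Int)))) (cache_line_number : Option Int) (cache_line_number_block : Int) : Int :=
  (match pvBhit cache_line_number cache_line_number_block cache 0 with
   | none => none
   | some (some i) => some i
   | some none =>
     match pvBempty cache_line_number_block cache 0 none with
     | none => none
     | some (some i) => some i
     | some none =>
       match pvBcounts cache_line_number_block cache with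
       | none => none
       | some [] => some 0
       | some (c0 :: rest) => pvBlru c0 0 1 rest).getD 0

-- ===== PRECONDITION & SPEC =====
-- the (line_number, use_count) pair of a block, none = the block is structurally invalid there
def pvLine (clnb : Int) (block : List (List (Option Int))) : Option (Option Int × Option Int) :=
  match PySem.List.pyGet? block clnb with
  | none => none
  | some cl =>
    match PySem.List.pyGet? cl 0, PySem.List.pyGet? cl 1 with
    | some l, some u => some (l, u)
    | _, _ => none

def pvIsHit (cln : Option Int) (q : Option (Option Int × Option Int)) : Bool :=
  match q with
  | some (l, _) => l == cln
  | none => false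

def pvIsEmpty (q : Option (Option Int × Option Int)) : Bool :=
  match q with
  | some (none, none) => true
  | _ => false

def pvIsStuck (q : Option (Option Int × Option Int)) : Bool :=
  match q with
  | some (some _, none) => true
  | _ => false

def pvHasCnt (q : Option (Option Int × Option Int)) : Bool :=
  match q with
  | some (_, some _) => true
  | _ => false

-- Pre_ excludes exactly the inputs on which the Python A raises:
-- (1) a structurally invalid block (IndexError) not shielded by an earlier cache hit,
-- (2) A's TypeError: a non-empty line with use_count None met while the selected best
--     carries an integer use count (no hit up to it, no empty before it, integer count at 0).
def Pre_get_best_cache_block_index (cache : List (List (List (Option Int)))) (cache_line_number : Option Int) (cache_line_number_block : Int) : Prop :=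
  (∀ k, k < (cache.map (pvLine cache_line_number_block)).length → (cache.map (pvLine cache_line_number_block)).getD k none = none → ∃ j, j < k ∧ pvIsHit cache_line_number ((cache.map (pvLine cache_line_number_block)).getD j none) = true) ∧
  (¬ ∃ k, k < (cache.map (pvLine cache_line_number_block)).length ∧ 1 ≤ k ∧ pvIsStuck ((cache.map (pvLine cache_line_number_block)).getD k none) = true ∧
      (∀ j, j ≤ k → pvIsHit cache_line_number ((cache.map (pvLine cache_line_number_block)).getD j none) = false) ∧
      (∀ j, j < k → pvIsEmpty ((cache.map (pvLine cache_line_number_block)).getD j none) = false) ∧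
      pvHasCnt ((cache.map (pvLine cache_line_number_block)).getD 0 none) = true)

instance (cache : List (List (List (Option Int)))) (cache_line_number : Option Int) (cache_line_number_block : Int) : Decidable (Pre_get_best_cache_block_index cache cache_line_number cache_line_number_block) := by
  unfold Pre_get_best_cache_block_index; infer_instance

def pvWitness_get_best_cache_block_index : List (List (List (Option Int))) × Option Int × Int :=
  ([[[some 1, some 2]], [[some 3, some 4]]], some 3, 0)

def Spec_get_best_cache_block_index (cache : List (List (List (Option Int)))) (cache_line_number : Option Int) (cache_line_number_block : Int) (out : Int) : Prop := out = get_best_cache_block_index_alt cache cache_line_number cache_line_number_block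
instance (cache : List (List (List (Option Int)))) (cache_line_number : Option Int) (cache_line_number_block : Int) (out : Int) : Decidable (Spec_get_best_cache_block_index cache cache_line_number cache_line_number_block out) := by unfold Spec_get_best_cache_block_index; infer_instance

-- ===== CLAIM (what is proved, stated in full; the proofs are below) =====
def Claim_equal_get_best_cache_block_index : Prop := ∀ (cache : List (List (List (Option Int)))) (cache_line_number : Option Int) (cache_line_number_block : Int), Dom_get_best_cache_block_index cache cache_line_number cache_line_number_block → Pre_get_best_cache_block_index cache cache_line_number cache_line_number_block → Spec_get_best_cache_block_index cache cache_line_number cache_line_number_block (get_best_cache_block_index cache cache_line_number cache_line_number_block)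

-- ===== LEMMAS AND PROOFS =====

-- abstract image of A's loop over the extracted (line_number, use_count) list;
-- the state keeps only best's use count (all A reads of `best`)
def pvFooA (cln : Option Int) : List (Option (Option Int × Option Int)) → Option (Option Int) → Int → Int → Option Int
  | [], _, bi, _ => some bi
  | none :: _, _, _, _ => none
  | some (l, u) :: rest, best, bi, i =>
    if l = cln then some i
    else if l = none ∧ u = none then pvFooA cln rest (some u) i (i + 1)
    else
      match best with
      | none => pvFooA cln rest (some u) i (i + 1)
      | some none => pvFooA cln rest best bi (i + 1)
      | some (some bv) =>
        match u with
        | none => none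
        | some uv => if uv < bv then pvFooA cln rest (some u) i (i + 1) else pvFooA cln rest best bi (i + 1)

def pvRelB : Option (List (Option Int)) → Option (Option Int) → Prop
  | none, none => True
  | some b, some u => PySem.List.pyGet? b 1 = some u
  | _, _ => False

theorem pv_bridgeA (cln : Option Int) (clnb : Int) : ∀ (cache : List (List (List (Option Int)))) (best : Option (List (Option Int))) (b' : Option (Option Int)) (bi i : Int), pvRelB best b' → pvAgo cln clnb cache best bi i = pvFooA cln (cache.map (pvLine clnb)) b' bi i := by
  intro cache
  induction cache with
  | nil => intro best b' bi i _; rfl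
  | cons block rest ih =>
    intro best b' bi i hrel
    cases hb : PySem.List.pyGet? block clnb with
    | none =>
      have hL : pvLine clnb block = none := by simp [pvLine, hb]
      simp [pvAgo, hb, hL, pvFooA]
    | some cl =>
      cases h1 : PySem.List.pyGet? cl 1 with
      | none =>
        cases h0 : PySem.List.pyGet? cl 0 with
        | none =>
          have hL : pvLine clnb block = none := by simp [pvLine, hb, h0]
          simp [pvAgo, hb, h0, hL, pvFooA]
        | some l =>
          have hL : pvLine clnb block = none := by simp [pvLine, hb, h0, h1]
          simp [pvAgo, hb, h0, h1, hL, pvFooA]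
      | some u =>
        cases h0 : PySem.List.pyGet? cl 0 with
        | none =>
          have hL : pvLine clnb block = none := by simp [pvLine, hb, h0]
          simp [pvAgo, hb, h0, hL, pvFooA]
        | some l =>
          have hL : pvLine clnb block = some (l, u) := by simp [pvLine, hb, h0, h1]
          simp only [pvAgo, hb, h0, h1, List.map_cons, hL, pvFooA]
          by_cases hhit : l = cln
          · rw [if_pos hhit, if_pos hhit]
          · rw [if_neg hhit, if_neg hhit]
            by_cases hemp : l = none ∧ u = none
            · rw [if_pos hemp, if_pos hemp]
              exact ih (some cl) (some u) i (i + 1) h1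
            · rw [if_neg hemp, if_neg hemp]
              cases best with
              | none =>
                cases b' with
                | none => exact ih (some cl) (some u) i (i + 1) h1
                | some x => exact hrel.elim
              | some b =>
                cases b' with
                | none => exact hrel.elim
                | some ub =>
                  have hb1 : PySem.List.pyGet? b 1 = some ub := hrel
                  simp only [hb1]
                  cases ub with
                  | none => exact ih (some b) (some none) bi (i + 1) hb1
                  | some bv =>
                    cases u with
                    | none => rfl
                    | some uv =>
                      simp only []
                      by_cases hcmp : uv < bv
                      · rw [if_pos hcmp, if_pos hcmp]
                        exact ih (some cl) (some (some uv)) i (i + 1) h1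
                      · rw [if_neg hcmp, if_neg hcmp]
                        exact ih (some b) (some (some bv)) bi (i + 1) hb1

-- "the loop raises no TypeError from this state on" (proof-side simulation predicate)
def pvOkA (cln : Option Int) : Option (Option Int) → List (Option Int × Option Int) → Prop
  | _, [] => True
  | best, (l, u) :: rest =>
    if l = cln then True
    else if l = none ∧ u = none then pvOkA cln (some u) rest
    else
      match best with
      | none => pvOkA cln (some u) rest
      | some none => pvOkA cln best rest
      | some (some bv) =>
        match u with
        | none => False
        | some uv => if uv < bv then pvOkA cln (some u) rest else pvOkA cln best rest

def pvPairEmpty (p : Option Int × Option Int) : Bool := p.1 == none && p.2 == none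

def pvLastEmpty : List (Option Int × Option Int) → Int
  | [] => 0
  | _ :: rest => if rest.any pvPairEmpty then 1 + pvLastEmpty rest else 0

def pvAmin : Int → Int → Int → List Int → Int
  | _, bi, _, [] => bi
  | m, bi, i, u :: rest => if u < m then pvAmin u i (i + 1) rest else pvAmin m bi (i + 1) rest

theorem pv_okA_someNone (cln : Option Int) : ∀ (pls : List (Option Int × Option Int)), pvOkA cln (some none) pls := by
  intro pls
  induction pls with
  | nil => trivial
  | cons p rest ih =>
    obtain ⟨l, u⟩ := p
    simp only [pvOkA]
    split
    · trivial
    · split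
      · rename_i h
        rw [h.2]
        exact ih
      · exact ih

theorem pv_okA_int (cln : Option Int) : ∀ (pls : List (Option Int × Option Int)) (bv : Int), (∀ k, (hk : k < pls.length) → pls[k].1 ≠ none → pls[k].2 = none → ∃ j, ∃ (hj : j < pls.length), j < k ∧ pls[j].1 = none ∧ pls[j].2 = none) → pvOkA cln (some (some bv)) pls := by
  intro pls
  induction pls with
  | nil => intro bv _; trivial
  | cons p rest ih =>
    intro bv H
    obtain ⟨l, u⟩ := p
    simp only [pvOkA]
    split
    · trivial
    · split
      · rename_i hemp
        rw [hemp.2]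
        exact pv_okA_someNone cln rest
      · rename_i hhit hemp
        cases u with
        | none =>
          exfalso
          have hl : l ≠ none := fun hc => hemp ⟨hc, rfl⟩
          obtain ⟨j, hj, hjk, _, _⟩ := H 0 (by simp) (by simpa using hl) (by simp)
          omega
        | some uv =>
          simp only []
          have Hr : ∀ k, (hk : k < rest.length) → rest[k].1 ≠ none → rest[k].2 = none → ∃ j, ∃ (hj : j < rest.length), j < k ∧ rest[j].1 = none ∧ rest[j].2 = none := by
            intro k hk h1 h2
            obtain ⟨j, hj, hjk, he1, he2⟩ := H (k + 1) (by simp only [List.length_cons]; omega) (by simpa using h1) (by simpa using h2)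
            cases j with
            | zero => exact absurd he2 (by simp)
            | succ j' =>
              exact ⟨j', by simpa using hj, by omega, by simpa using he1, by simpa using he2⟩
          split
          · exact ih uv Hr
          · exact ih bv Hr

theorem pv_okA_main (cln : Option Int) : ∀ (pls : List (Option Int × Option Int)), (∀ k, (hk : k < pls.length) → 1 ≤ k → pls[k].1 ≠ none → pls[k].2 = none → (∀ j, (hj : j < pls.length) → j < k → ¬(pls[j].1 = none ∧ pls[j].2 = none)) → (∃ l0, pls.head? = some (l0, none))) → pvOkA cln none pls := by
  intro pls H
  cases pls with
  | nil => trivial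
  | cons p rest =>
    obtain ⟨l, u⟩ := p
    simp only [pvOkA]
    split
    · trivial
    · split
      · rename_i hemp
        rw [hemp.2]
        exact pv_okA_someNone cln rest
      · rename_i hhit hemp
        cases u with
        | none => exact pv_okA_someNone cln rest
        | some v0 =>
          apply pv_okA_int
          intro k hk h1 h2
          by_contra hcon
          have hhead := H (k + 1) (by simp only [List.length_cons]; omega) (by omega) (by simpa using h1) (by simpa using h2) ?_
          · obtain ⟨l0, hl0⟩ := hhead
            simp at hl0
          · intro j hj hjk hc
            cases j with
            | zero => exact absurd hc.2 (by simp)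
            | succ j' =>
              exact hcon ⟨j', by simpa using hj, by omega, by simpa using hc.1, by simpa using hc.2⟩

theorem pv_fooA_hit (cln : Option Int) : ∀ (pls : List (Option Int × Option Int)) (u : Option Int) (rest : List (Option (Option Int × Option Int))) (best : Option (Option Int)) (bi i : Int), (∀ p ∈ pls, p.1 ≠ cln) → pvOkA cln best pls → pvFooA cln (pls.map some ++ some (cln, u) :: rest) best bi i = some (i + (pls.length : Int)) := by
  intro pls
  induction pls with
  | nil =>
    intro u rest best bi i _ _
    simp [pvFooA]
  | cons p plsR ih =>
    intro u rest best bi i hnh hok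
    obtain ⟨l, u'⟩ := p
    have hl : l ≠ cln := hnh (l, u') (by simp)
    simp only [List.map_cons, List.cons_append, pvFooA]
    rw [if_neg hl]
    simp only [pvOkA] at hok
    rw [if_neg hl] at hok
    have hnh' : ∀ q ∈ plsR, q.1 ≠ cln := fun q hq => hnh q (List.mem_cons_of_mem _ hq)
    by_cases hemp : l = none ∧ u' = none
    · rw [if_pos hemp]
      rw [if_pos hemp] at hok
      rw [ih u rest (some u') i (i + 1) hnh' hok]
      congr 1
      simp only [List.length_cons]
      push_cast
      ring
    · rw [if_neg hemp]
      rw [if_neg hemp] at hok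
      cases best with
      | none =>
        rw [ih u rest (some u') i (i + 1) hnh' hok]
        simp only [List.length_cons]
        push_cast
        ring
      | some b1 =>
        cases b1 with
        | none =>
          simp only []
          rw [ih u rest (some none) bi (i + 1) hnh' hok]
          congr 1
          simp only [List.length_cons]
          push_cast
          ring
        | some bv =>
          simp only []
          simp only [] at hok
          cases u' with
          | none => exact hok.elim
          | some uv =>
            simp only []
            simp only [] at hok
            by_cases hc : uv < bv
            · rw [if_pos hc]
              rw [if_pos hc] at hok
              rw [ih u rest (some (some uv)) i (i + 1) hnh' hok]
              congr 1
              simp only [List.length_cons]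
              push_cast
              ring
            · rw [if_neg hc]
              rw [if_neg hc] at hok
              rw [ih u rest (some (some bv)) bi (i + 1) hnh' hok]
              congr 1
              simp only [List.length_cons]
              push_cast
              ring

theorem pv_fooA_stay (cln : Option Int) : ∀ (pls : List (Option Int × Option Int)) (bi i : Int), (∀ p ∈ pls, p.1 ≠ cln ∧ ¬(p.1 = none ∧ p.2 = none)) → pvFooA cln (pls.map some) (some none) bi i = some bi := by
  intro pls
  induction pls with
  | nil => intro bi i _; rfl
  | cons p plsR ih =>
    intro bi i h
    obtain ⟨l, u⟩ := p
    have h0 := h (l, u) (by simp)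
    simp only [List.map_cons, pvFooA]
    rw [if_neg h0.1, if_neg h0.2]
    exact ih bi (i + 1) (fun q hq => h q (List.mem_cons_of_mem _ hq))

theorem pv_fooA_empty (cln : Option Int) : ∀ (pls : List (Option Int × Option Int)) (best : Option (Option Int)) (bi i : Int), (∀ p ∈ pls, p.1 ≠ cln) → pvOkA cln best pls → pls.any pvPairEmpty = true → pvFooA cln (pls.map some) best bi i = some (i + pvLastEmpty pls) := by
  intro pls
  induction pls with
  | nil => intro best bi i _ _ hany; simp at hany
  | cons p plsR ih =>
    intro best bi i hnh hok hany
    obtain ⟨l, u⟩ := p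
    have hl : l ≠ cln := hnh (l, u) (by simp)
    simp only [List.map_cons, pvFooA]
    rw [if_neg hl]
    simp only [pvOkA] at hok
    rw [if_neg hl] at hok
    simp only [pvLastEmpty]
    have hnh' : ∀ q ∈ plsR, q.1 ≠ cln := fun q hq => hnh q (List.mem_cons_of_mem _ hq)
    by_cases hemp : l = none ∧ u = none
    · rw [if_pos hemp]
      rw [if_pos hemp] at hok
      by_cases hrp : plsR.any pvPairEmpty = true
      · rw [if_pos hrp, ih (some u) i (i + 1) hnh' hok hrp]
        congr 1
        ring
      · rw [if_neg hrp]
        obtain ⟨hl0, hu0⟩ := hemp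
        subst hu0
        have hf : plsR.any pvPairEmpty = false := by simpa using hrp
        rw [pv_fooA_stay cln plsR i (i + 1) (fun q hq => ⟨hnh' q hq, by
          have := List.any_eq_false.mp hf q hq
          simp only [pvPairEmpty, Bool.and_eq_true, beq_iff_eq] at this
          tauto⟩)]
        simp
    · rw [if_neg hemp]
      rw [if_neg hemp] at hok
      have he : pvPairEmpty (l, u) = false := by
        simp only [pvPairEmpty, Bool.and_eq_false_iff, beq_eq_false_iff_ne, ne_eq]
        tauto
      have hrp : plsR.any pvPairEmpty = true := by
        simp only [List.any_cons, he, Bool.false_or] at hany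
        exact hany
      rw [if_pos hrp]
      cases best with
      | none =>
        rw [ih (some u) i (i + 1) hnh' hok hrp]
        ring
      | some b1 =>
        cases b1 with
        | none =>
          simp only []
          rw [ih (some none) bi (i + 1) hnh' hok hrp]
          congr 1
          ring
        | some bv =>
          simp only []
          simp only [] at hok
          cases u with
          | none => exact hok.elim
          | some uv =>
            simp only []
            simp only [] at hok
            by_cases hc : uv < bv
            · rw [if_pos hc]
              rw [if_pos hc] at hok
              rw [ih (some (some uv)) i (i + 1) hnh' hok hrp]
              congr 1
              ring
            · rw [if_neg hc]
              rw [if_neg hc] at hok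
              rw [ih (some (some bv)) bi (i + 1) hnh' hok hrp]
              congr 1
              ring

theorem pv_fooA_min (cln : Option Int) : ∀ (pls : List (Option Int × Option Int)) (us : List Int) (bv bi i : Int), pls.map Prod.snd = us.map some → (∀ p ∈ pls, p.1 ≠ cln ∧ ¬(p.1 = none ∧ p.2 = none)) → pvFooA cln (pls.map some) (some (some bv)) bi i = some (pvAmin bv bi i us) := by
  intro pls
  induction pls with
  | nil =>
    intro us bv bi i hsnd _
    cases us with
    | nil => rfl
    | cons a r => simp at hsnd
  | cons p plsR ih =>
    intro us bv bi i hsnd hne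
    obtain ⟨l, u⟩ := p
    cases us with
    | nil => simp at hsnd
    | cons uv usR =>
      simp only [List.map_cons, List.cons.injEq] at hsnd
      obtain ⟨hu, hrest⟩ := hsnd
      have h0 := hne (l, u) (by simp)
      simp only [List.map_cons, pvFooA]
      rw [if_neg h0.1, if_neg h0.2]
      subst hu
      simp only []
      simp only [pvAmin]
      by_cases hc : uv < bv
      · rw [if_pos hc, if_pos hc]
        exact ih usR uv i (i + 1) hrest (fun q hq => hne q (List.mem_cons_of_mem _ hq))
      · rw [if_neg hc, if_neg hc]
        exact ih usR bv bi (i + 1) hrest (fun q hq => hne q (List.mem_cons_of_mem _ hq))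

theorem pv_line_some (clnb : Int) (b : List (List (Option Int))) (l u : Option Int) : pvLine clnb b = some (l, u) → ∃ cl, PySem.List.pyGet? b clnb = some cl ∧ PySem.List.pyGet? cl 0 = some l ∧ PySem.List.pyGet? cl 1 = some u := by
  intro h
  unfold pvLine at h
  cases hb : PySem.List.pyGet? b clnb with
  | none => simp [hb] at h
  | some cl =>
    simp only [hb] at h
    cases h0 : PySem.List.pyGet? cl 0 with
    | none => simp [h0] at h
    | some l' =>
      cases h1 : PySem.List.pyGet? cl 1 with
      | none => simp [h0, h1] at h
      | some u' =>
        simp only [h0, h1, Option.some.injEq, Prod.mk.injEq] at h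
        exact ⟨cl, rfl, by simp [h0, h.1], by simp [h1, h.2]⟩

theorem pv_bhit_found (cln : Option Int) (clnb : Int) : ∀ (preC : List (List (List (Option Int)))) (bH : List (List (Option Int))) (restC : List (List (List (Option Int)))) (i : Int), (∀ b ∈ preC, ∃ p, pvLine clnb b = some p ∧ p.1 ≠ cln) → (∃ u, pvLine clnb bH = some (cln, u)) → pvBhit cln clnb (preC ++ bH :: restC) i = some (some (i + (preC.length : Int))) := by
  intro preC
  induction preC with
  | nil =>
    intro bH restC i _ hH
    obtain ⟨u, hu⟩ := hH
    obtain ⟨cl, hb, h0, _⟩ := pv_line_some clnb bH cln u hu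
    simp only [List.nil_append, pvBhit, hb, h0, List.length_nil]
    norm_num
  | cons b preR ih =>
    intro bH restC i hpre hH
    obtain ⟨⟨l, u⟩, hp, hne⟩ := hpre b (by simp)
    obtain ⟨cl, hb, h0, _⟩ := pv_line_some clnb b l u hp
    simp only [List.cons_append, pvBhit, hb, h0]
    rw [if_neg hne, ih bH restC (i + 1) (fun b' hb' => hpre b' (List.mem_cons_of_mem _ hb')) hH]
    congr 1
    simp only [List.length_cons]
    push_cast
    ring

theorem pv_bhit_none (cln : Option Int) (clnb : Int) : ∀ (cache : List (List (List (Option Int)))) (i : Int), (∀ b ∈ cache, ∃ p, pvLine clnb b = some p ∧ p.1 ≠ cln) → pvBhit cln clnb cache i = some none := by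
  intro cache
  induction cache with
  | nil => intro i _; rfl
  | cons b rest ih =>
    intro i hall
    obtain ⟨⟨l, u⟩, hp, hne⟩ := hall b (by simp)
    obtain ⟨cl, hb, h0, _⟩ := pv_line_some clnb b l u hp
    simp only [pvBhit, hb, h0]
    rw [if_neg hne]
    exact ih (i + 1) (fun b' hb' => hall b' (List.mem_cons_of_mem _ hb'))

theorem pv_bempty_cons (clnb : Int) (b : List (List (Option Int))) (rest : List (List (List (Option Int)))) (l u : Option Int) (i : Int) (acc : Option Int) : pvLine clnb b = some (l, u) → pvBempty clnb (b :: rest) i acc = pvBempty clnb rest (i + 1) (if l = none ∧ u = none then some i else acc) := by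
  intro hp
  obtain ⟨cl, hb, h0, h1⟩ := pv_line_some clnb b l u hp
  simp only [pvBempty, hb, h0]
  by_cases hl : l = none
  · subst hl
    rw [if_pos rfl]
    simp only [h1]
    by_cases hu : u = none
    · subst hu
      simp
    · rw [if_neg hu, if_neg (by tauto)]
  · rw [if_neg hl, if_neg (by tauto)]

theorem pv_bempty_eq (cln : Option Int) (clnb : Int) : ∀ (cache : List (List (List (Option Int)))) (pls : List (Option Int × Option Int)) (i : Int) (acc : Option Int), cache.map (pvLine clnb) = pls.map some → pvBempty clnb cache i acc = some (if pls.any pvPairEmpty then some (i + pvLastEmpty pls) else acc) := by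
  intro cache
  induction cache with
  | nil =>
    intro pls i acc hm
    cases pls with
    | nil => rfl
    | cons p r => exact absurd hm (by simp)
  | cons b rest ih =>
    intro pls i acc hm
    cases pls with
    | nil => exact absurd hm (by simp)
    | cons p plsR =>
      simp only [List.map_cons, List.cons.injEq] at hm
      obtain ⟨hp, hrest⟩ := hm
      obtain ⟨l, u⟩ := p
      rw [pv_bempty_cons clnb b rest l u i acc hp,
          ih plsR (i + 1) (if l = none ∧ u = none then some i else acc) hrest]
      by_cases hemp : l = none ∧ u = none
      · have he : pvPairEmpty (l, u) = true := by
          simp only [pvPairEmpty, Bool.and_eq_true, beq_iff_eq]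
          exact hemp
        rw [if_pos hemp]
        have hany : ((l, u) :: plsR).any pvPairEmpty = true := by simp [List.any_cons, he]
        rw [if_pos hany]
        simp only [pvLastEmpty]
        by_cases hrp : plsR.any pvPairEmpty = true
        · rw [if_pos hrp, if_pos hrp]
          simp only [Option.some.injEq]
          ring
        · rw [if_neg hrp, if_neg hrp]
          simp
      · have he : pvPairEmpty (l, u) = false := by
          simp only [pvPairEmpty, Bool.and_eq_false_iff, beq_eq_false_iff_ne, ne_eq]
          tauto
        rw [if_neg hemp]
        have hany : ((l, u) :: plsR).any pvPairEmpty = plsR.any pvPairEmpty := by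
          simp [List.any_cons, he]
        rw [hany]
        simp only [pvLastEmpty]
        by_cases hrp : plsR.any pvPairEmpty = true
        · rw [if_pos hrp, if_pos hrp, if_pos hrp]
          simp only [Option.some.injEq]
          ring
        · rw [if_neg hrp, if_neg hrp]

theorem pv_bcounts_eq (clnb : Int) : ∀ (cache : List (List (List (Option Int)))) (pls : List (Option Int × Option Int)), cache.map (pvLine clnb) = pls.map some → pvBcounts clnb cache = some (pls.map Prod.snd) := by
  intro cache
  induction cache with
  | nil =>
    intro pls hm
    cases pls with
    | nil => rfl
    | cons p r => exact absurd hm (by simp)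
  | cons b rest ih =>
    intro pls hm
    cases pls with
    | nil => exact absurd hm (by simp)
    | cons p plsR =>
      simp only [List.map_cons, List.cons.injEq] at hm
      obtain ⟨hp, hrest⟩ := hm
      obtain ⟨l, u⟩ := p
      obtain ⟨cl, hb, h0, h1⟩ := pv_line_some clnb b l u hp
      simp only [pvBcounts, hb, h1, ih plsR hrest, Option.map_some, List.map_cons]

-- B's phase-3 loop never moves off a None best count
theorem pv_blru_none : ∀ (rest : List (Option Int)) (bi i : Int), pvBlru none bi i rest = some bi := by
  intro rest
  induction rest with
  | nil => intro bi i; rfl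
  | cons c r ih => intro bi i; simp only [pvBlru]; exact ih bi (i + 1)

-- on all-integer counts B's phase-3 loop is the same first-minimum recursion as A's tail
theorem pv_blru_int : ∀ (us : List Int) (bv bi i : Int), pvBlru (some bv) bi i (us.map some) = some (pvAmin bv bi i us) := by
  intro us
  induction us with
  | nil => intro bv bi i; rfl
  | cons u rest ih =>
    intro bv bi i
    simp only [List.map_cons, pvBlru, pvAmin]
    by_cases h : u < bv
    · rw [if_pos h, if_pos h]
      exact ih u i (i + 1)
    · rw [if_neg h, if_neg h]
      exact ih bv bi (i + 1)

theorem pv_unwrap {α : Type} : ∀ (M : List (Option α)), (∀ x ∈ M, x ≠ none) → ∃ (pls : List α), M = pls.map some := by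
  intro M
  induction M with
  | nil => exact fun _ => ⟨[], rfl⟩
  | cons x xs ih =>
    intro h
    cases x with
    | none => exact absurd rfl (h none (by simp))
    | some a =>
      obtain ⟨pls, hp⟩ := ih (fun y hy => h y (List.mem_cons_of_mem _ hy))
      exact ⟨a :: pls, by simp [hp]⟩

theorem pv_witness_ok : Dom_get_best_cache_block_index (pvWitness_get_best_cache_block_index.1) (pvWitness_get_best_cache_block_index.2.1) (pvWitness_get_best_cache_block_index.2.2) ∧ Pre_get_best_cache_block_index (pvWitness_get_best_cache_block_index.1) (pvWitness_get_best_cache_block_index.2.1) (pvWitness_get_best_cache_block_index.2.2) := by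
  decide

theorem pv_getD {α : Type} (L : List (Option α)) (k : Nat) (hk : k < L.length) : L.getD k none = L[k] := by
  rw [List.getD_eq_getElem?_getD, List.getElem?_eq_getElem hk]
  rfl

theorem pv_idx_of_unwrap {α : Type} (L : List (Option α)) (pls : List α) (hp : L = pls.map some) : ∀ j (hj : j < pls.length), L.getD j none = some (pls[j]) := by
  intro j hj
  subst hp
  rw [pv_getD _ j (by simpa using hj)]
  simp

theorem pv_nhit_pls (cln : Option Int) (L : List (Option (Option Int × Option Int))) (pls : List (Option Int × Option Int)) (hidx : ∀ j (hj : j < pls.length), L.getD j none = some (pls[j])) (hnhit : ∀ j, j < pls.length → pvIsHit cln (L.getD j none) = false) : ∀ p ∈ pls, p.1 ≠ cln := by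
  intro p hp
  obtain ⟨j, hj, hpj⟩ := List.mem_iff_getElem.mp hp
  have hf := hnhit j hj
  rw [hidx j hj, hpj] at hf
  simpa [pvIsHit] using hf

theorem pv_okA_transfer (cln : Option Int) (L : List (Option (Option Int × Option Int))) (pls : List (Option Int × Option Int))
    (hidx : ∀ j (hj : j < pls.length), L.getD j none = some (pls[j]))
    (hbound : pls.length ≤ L.length)
    (hnhit : ∀ j, j < pls.length → pvIsHit cln (L.getD j none) = false)
    (P2 : ¬ ∃ k, k < L.length ∧ 1 ≤ k ∧ pvIsStuck (L.getD k none) = true ∧ (∀ j, j ≤ k → pvIsHit cln (L.getD j none) = false) ∧ (∀ j, j < k → pvIsEmpty (L.getD j none) = false) ∧ pvHasCnt (L.getD 0 none) = true) :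
    pvOkA cln none pls := by
  apply pv_okA_main
  intro k hk h1k h1 h2 hnoemp
  by_contra hhead
  apply P2
  refine ⟨k, by omega, h1k, ?_, ?_, ?_, ?_⟩
  · rw [hidx k hk]
    obtain ⟨lv, hlv⟩ := Option.ne_none_iff_exists'.mp h1
    have hpk : pls[k] = (some lv, none) := Prod.ext hlv h2
    rw [hpk]
    rfl
  · intro j hj
    exact hnhit j (by omega)
  · intro j hj
    have hne := hnoemp j (by omega) hj
    rw [hidx j (by omega)]
    rcases hq : pls[j]'(by omega) with ⟨ql, qu⟩
    rw [hq] at hne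
    rcases ql with _ | lv <;> rcases qu with _ | uv
    · exact absurd ⟨rfl, rfl⟩ hne
    · rfl
    · rfl
    · rfl
  · have h0 : 0 < pls.length := by omega
    rw [hidx 0 h0]
    rcases hq0 : pls[0]'h0 with ⟨ql, qu⟩
    cases qu with
    | none =>
      exfalso
      apply hhead
      refine ⟨ql, ?_⟩
      rw [List.head?_eq_getElem?, List.getElem?_eq_getElem h0, hq0]
    | some v => rfl

-- ===== VERDICT (by name: the statement is the Claim_ definition above) =====
theorem get_best_cache_block_index_spec : Claim_equal_get_best_cache_block_index := by
  intro cache cln clnb hdom hpre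
  unfold Spec_get_best_cache_block_index
  unfold Pre_get_best_cache_block_index at hpre
  obtain ⟨P1, P2⟩ := hpre
  set L := cache.map (pvLine clnb) with hLdef
  have hLn : L.length = cache.length := by simp [hLdef]
  have hgetL : ∀ k, (hk : k < cache.length) → L.getD k none = pvLine clnb (cache[k]) := by
    intro k hk
    rw [pv_getD L k (by omega)]
    simp [hLdef]
  by_cases hhit : ∃ k, k < L.length ∧ pvIsHit cln (L.getD k none) = true
  · -- CASE: a cache hit exists; both sides return the first hit index
    have hk0 := Nat.find_spec hhit
    have hk0min : ∀ j, j < Nat.find hhit → ¬(j < L.length ∧ pvIsHit cln (L.getD j none) = true) :=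
      fun j hj => Nat.find_min hhit hj
    set k0 := Nat.find hhit with hk0def
    obtain ⟨hk0n, hk0hit⟩ := hk0
    have hnhitpre : ∀ j, j < k0 → pvIsHit cln (L.getD j none) = false := by
      intro j hj
      have h := hk0min j hj
      have hjn : j < L.length := by omega
      simpa [hjn] using h
    have hwfpre : ∀ j, j < k0 → L.getD j none ≠ none := by
      intro j hj hn
      obtain ⟨j', hj', hhit'⟩ := P1 j (by omega) hn
      have hf := hnhitpre j' (by omega)
      rw [hhit'] at hf
      exact absurd hf (by simp)
    have hk0c : k0 < cache.length := by omega
    have hL0 : L.getD k0 none = pvLine clnb (cache[k0]) := hgetL k0 hk0c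
    have hhit0 : pvIsHit cln (pvLine clnb (cache[k0])) = true := by rw [← hL0]; exact hk0hit
    obtain ⟨lH, uH, hbH⟩ : ∃ lH uH, pvLine clnb (cache[k0]) = some (lH, uH) := by
      cases hq : pvLine clnb (cache[k0]) with
      | none => rw [hq] at hhit0; simp [pvIsHit] at hhit0
      | some p => exact ⟨p.1, p.2, by simp⟩
    have hlH : lH = cln := by
      rw [hbH] at hhit0
      simpa [pvIsHit] using hhit0
    have htake : (cache.take k0).map (pvLine clnb) = L.take k0 := by
      simp [hLdef, List.map_take]
    have hwfpre' : ∀ x ∈ (cache.take k0).map (pvLine clnb), x ≠ none := by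
      intro x hx
      rw [htake] at hx
      obtain ⟨j, hj, hxj⟩ := List.mem_iff_getElem.mp hx
      have hjlen : j < k0 := by
        have h2 := hj
        simp only [List.length_take] at h2
        omega
      rw [← hxj]
      have h3 : (L.take k0)[j]'hj = L[j]'(by omega) := List.getElem_take
      rw [h3, ← pv_getD L j (by omega)]
      exact hwfpre j hjlen
    obtain ⟨pls, hpls⟩ := pv_unwrap _ hwfpre'
    have hplen : pls.length = k0 := by
      have h4 := congrArg List.length hpls
      simp only [List.length_map, List.length_take] at h4
      omega
    have htake' : L.take k0 = pls.map some := by rw [← htake, hpls]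
    have hidx' : ∀ j, (hj : j < pls.length) → L.getD j none = some (pls[j]) := by
      intro j hj
      have h5 := pv_idx_of_unwrap (L.take k0) pls htake' j hj
      rw [← h5, pv_getD L j (by omega), pv_getD (L.take k0) j (by simp [List.length_take]; omega)]
      exact List.getElem_take.symm
    have hnhp : ∀ p ∈ pls, p.1 ≠ cln :=
      pv_nhit_pls cln L pls hidx' (fun j hj => hnhitpre j (by omega))
    have hok : pvOkA cln none pls :=
      pv_okA_transfer cln L pls hidx' (by omega) (fun j hj => hnhitpre j (by omega)) P2
    have hdecomp : cache = cache.take k0 ++ cache[k0] :: cache.drop (k0 + 1) := by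
      conv_lhs => rw [← List.take_append_drop k0 cache]
      rw [List.drop_eq_getElem_cons hk0c]
    have hLdecomp : cache.map (pvLine clnb) = pls.map some ++ some (cln, uH) :: (cache.drop (k0 + 1)).map (pvLine clnb) := by
      conv_lhs => rw [hdecomp]
      simp only [List.map_append, List.map_cons]
      rw [hpls, hbH, hlH]
    have hA : get_best_cache_block_index cache cln clnb = (k0 : Int) := by
      unfold get_best_cache_block_index
      rw [pv_bridgeA cln clnb cache none none 0 0 trivial]
      rw [← hLdef, hLdef, hLdecomp]
      rw [pv_fooA_hit cln pls uH _ none 0 0 hnhp hok]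
      simp [hplen]
    have hpreB : ∀ b ∈ cache.take k0, ∃ p, pvLine clnb b = some p ∧ p.1 ≠ cln := by
      intro b hb
      obtain ⟨j, hj, hbj⟩ := List.mem_iff_getElem.mp hb
      have hjlen : j < k0 := by
        have h6 := hj
        simp only [List.length_take] at h6
        omega
      refine ⟨pls[j]'(by omega), ?_, hnhp _ (List.getElem_mem _)⟩
      have hb2 : b = cache[j]'(by omega) := by
        rw [← hbj]
        exact List.getElem_take
      rw [hb2, ← hgetL j (by omega), hidx' j (by omega)]
    have hB : get_best_cache_block_index_alt cache cln clnb = (k0 : Int) := by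
      unfold get_best_cache_block_index_alt
      conv_lhs => rw [hdecomp]
      rw [pv_bhit_found cln clnb (cache.take k0) (cache[k0]) (cache.drop (k0 + 1)) 0 hpreB ⟨uH, by rw [hbH, hlH]⟩]
      simp only []
      simp [List.length_take, min_eq_left (le_of_lt hk0c)]
    rw [hA, hB]
  · -- CASE: no hit anywhere
    have hnh : ∀ k, k < L.length → pvIsHit cln (L.getD k none) = false := by
      intro k hk
      by_contra hc
      exact hhit ⟨k, hk, by simpa using hc⟩
    have hwf : ∀ x ∈ L, x ≠ none := by
      intro x hx hn
      obtain ⟨k, hk, hxk⟩ := List.mem_iff_getElem.mp hx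
      have hgd : L.getD k none = none := by
        rw [pv_getD L k hk, hxk]
        exact hn
      obtain ⟨j, hj, hhit'⟩ := P1 k hk hgd
      have hf := hnh j (by omega)
      rw [hhit'] at hf
      exact absurd hf (by simp)
    obtain ⟨pls, hpls⟩ := pv_unwrap L hwf
    have hplen : pls.length = L.length := by
      have h7 := congrArg List.length hpls
      simpa using h7.symm
    have hidx' : ∀ j, (hj : j < pls.length) → L.getD j none = some (pls[j]) :=
      pv_idx_of_unwrap L pls hpls
    have hnhp : ∀ p ∈ pls, p.1 ≠ cln :=
      pv_nhit_pls cln L pls hidx' (fun j hj => hnh j (by omega))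
    have hm : cache.map (pvLine clnb) = pls.map some := by rw [← hLdef]; exact hpls
    have hallB : ∀ b ∈ cache, ∃ p, pvLine clnb b = some p ∧ p.1 ≠ cln := by
      intro b hb
      obtain ⟨j, hj, hbj⟩ := List.mem_iff_getElem.mp hb
      refine ⟨pls[j]'(by omega), ?_, hnhp _ (List.getElem_mem _)⟩
      rw [← hbj, ← hgetL j hj, hidx' j (by omega)]
    by_cases hemp : pls.any pvPairEmpty = true
    · -- no hit, some empty line: both sides return the last empty index
      have hok : pvOkA cln none pls :=
        pv_okA_transfer cln L pls hidx' (by omega) (fun j hj => hnh j (by omega)) P2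
      have hA : get_best_cache_block_index cache cln clnb = 0 + pvLastEmpty pls := by
        unfold get_best_cache_block_index
        rw [pv_bridgeA cln clnb cache none none 0 0 trivial, hm,
            pv_fooA_empty cln pls none 0 0 hnhp hok hemp]
        rfl
      have hB : get_best_cache_block_index_alt cache cln clnb = 0 + pvLastEmpty pls := by
        unfold get_best_cache_block_index_alt
        rw [pv_bhit_none cln clnb cache 0 hallB]
        simp only []
        rw [pv_bempty_eq cln clnb cache pls 0 none hm, if_pos hemp]
        rfl
      rw [hA, hB]
    · -- no hit, no empty line
      have hempf : pls.any pvPairEmpty = false := by simpa using hemp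
      have hnoemp : ∀ p ∈ pls, ¬(p.1 = none ∧ p.2 = none) := by
        intro p hp hc
        have h8 := List.any_eq_false.mp hempf p hp
        simp only [pvPairEmpty, Bool.and_eq_true, beq_iff_eq] at h8
        exact h8 ⟨hc.1, hc.2⟩
      rcases pls with _ | ⟨⟨l0, u0⟩, plsR⟩
      · -- empty cache
        have hcache : cache = [] := by
          have h9 : cache.length = 0 := by
            have h10 := congrArg List.length hpls
            simp only [List.length_map, List.length_nil] at h10
            omega
          exact List.eq_nil_of_length_eq_zero h9
        subst hcache
        rfl
      · have hl0hit : l0 ≠ cln := hnhp (l0, u0) (by simp)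
        have hl0ne : ¬(l0 = none ∧ u0 = none) := hnoemp (l0, u0) (by simp)
        have hneR : ∀ q ∈ plsR, q.1 ≠ cln ∧ ¬(q.1 = none ∧ q.2 = none) :=
          fun q hq => ⟨hnhp q (List.mem_cons_of_mem _ hq), hnoemp q (List.mem_cons_of_mem _ hq)⟩
        cases u0 with
        | none =>
          -- first selected count is None: A's best is stuck at 0, B's loop never moves off it
          have hA : get_best_cache_block_index cache cln clnb = 0 := by
            unfold get_best_cache_block_index
            rw [pv_bridgeA cln clnb cache none none 0 0 trivial, hm]
            simp only [List.map_cons, pvFooA]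
            rw [if_neg hl0hit]
            rw [pv_fooA_stay cln plsR 0 (0 + 1) hneR]
            simp
          have hB : get_best_cache_block_index_alt cache cln clnb = 0 := by
            unfold get_best_cache_block_index_alt
            rw [pv_bhit_none cln clnb cache 0 hallB]
            simp only []
            rw [pv_bempty_eq cln clnb cache ((l0, none) :: plsR) 0 none hm,
                if_neg (by simp [hempf])]
            simp only []
            rw [pv_bcounts_eq clnb cache ((l0, none) :: plsR) hm]
            simp only [List.map_cons]
            rw [pv_blru_none (plsR.map Prod.snd) 0 1]
            rfl
          rw [hA, hB]
        | some v0 =>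
          -- LRU phase: all use counts are integers; both run the first-minimum recursion
          have hcnt : ∀ q ∈ plsR, q.2 ≠ none := by
            intro q hq hq2
            obtain ⟨k, hk, hqk⟩ := List.mem_iff_getElem.mp hq
            apply P2
            have hlen2 : ((l0, some v0) :: plsR).length = L.length := hplen
            have hkL : k + 1 < L.length := by
              simp only [List.length_cons] at hlen2
              omega
            refine ⟨k + 1, hkL, by omega, ?_, fun j _ => hnh j (by omega), ?_, ?_⟩
            · rw [hidx' (k + 1) (by simp only [List.length_cons]; omega)]
              have hget : ((l0, some v0) :: plsR)[k + 1]'(by simp only [List.length_cons]; omega) = q := by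
                simp only [List.getElem_cons_succ]
                rw [hqk]
              rw [hget]
              have hq1 : q.1 ≠ none := by
                intro hc
                exact hnoemp q (List.mem_cons_of_mem _ hq) ⟨hc, hq2⟩
              obtain ⟨lv, hlv⟩ := Option.ne_none_iff_exists'.mp hq1
              have hqe : q = (some lv, none) := Prod.ext hlv hq2
              rw [hqe]
              rfl
            · intro j hj
              have hjp : j < ((l0, some v0) :: plsR).length := by
                simp only [List.length_cons] at hlen2 ⊢
                omega
              rw [hidx' j hjp]
              have hne := hnoemp (((l0, some v0) :: plsR)[j]'hjp) (List.getElem_mem _)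
              rcases hqj : ((l0, some v0) :: plsR)[j]'hjp with ⟨ql, qu⟩
              rw [hqj] at hne
              rcases ql with _ | lv <;> rcases qu with _ | uv
              · exact absurd ⟨rfl, rfl⟩ hne
              · rfl
              · rfl
              · rfl
            · rw [hidx' 0 (by simp)]
              rfl
          obtain ⟨us, hus⟩ := pv_unwrap (plsR.map Prod.snd) (by
            intro x hx hxn
            obtain ⟨q, hq, hqx⟩ := List.mem_map.mp hx
            exact hcnt q hq (by rw [hqx]; exact hxn))
          have hA : get_best_cache_block_index cache cln clnb = pvAmin v0 0 (0 + 1) us := by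
            unfold get_best_cache_block_index
            rw [pv_bridgeA cln clnb cache none none 0 0 trivial, hm]
            simp only [List.map_cons, pvFooA]
            rw [if_neg hl0hit, if_neg hl0ne]
            rw [pv_fooA_min cln plsR us v0 0 (0 + 1) hus hneR]
            rfl
          have hB : get_best_cache_block_index_alt cache cln clnb = pvAmin v0 0 1 us := by
            unfold get_best_cache_block_index_alt
            rw [pv_bhit_none cln clnb cache 0 hallB]
            simp only []
            rw [pv_bempty_eq cln clnb cache ((l0, some v0) :: plsR) 0 none hm,
                if_neg (by simp [hempf])]
            simp only []
            rw [pv_bcounts_eq clnb cache ((l0, some v0) :: plsR) hm]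
            simp only [List.map_cons]
            rw [hus, pv_blru_int us v0 0 1]
            rfl
          rw [hA, hB]
          norm_num
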